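-- pv_equiv track=rewrite | github.com/liupengsay/PyIsTheBestLang | src/string/lyndon_decomposition/template.py | max_express
-- ===== SOURCE A (Python) =====
-- def max_express(sec):
--     """template of maximum lexicographic expression"""
--     n = len(sec)  # max_suffix
--     k, i, j = 0, 0, 1
--     while k < n and i < n and j < n:
--         if sec[(i + k) % n] == sec[(j + k) % n]:
--             k += 1
--         else:
--             if sec[(i + k) % n] < sec[(j + k) % n]:
--                 i = i + k + 1
--             else:
--                 j = j + k + 1
--             if i == j:
--                 i += 1
--             k = 0
--     i = i if i < j else j
--     return i, sec[i:] + sec[:i]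
-- ===== SOURCE B (Python) =====
-- def max_express(sec):
--     """Brute force: pick the smallest index whose rotation is lexicographically largest."""
--     n = len(sec)
--     best = 0
--     for x in range(1, n):
--         if sec[x:] + sec[:x] > sec[best:] + sec[:best]:
--             best = x
--     return best, sec[best:] + sec[:best]
-- ===== Notes on version B (the rewrite author's own statement) =====
-- stated objective: simpler
-- what changed: Replaces the linear dueling-pointer (Booth-style) scan by a plain brute-force loop that keeps the smallest index whose rotation sec[x:]+sec[:x] is lexicographically largest.
import Mathlib
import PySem

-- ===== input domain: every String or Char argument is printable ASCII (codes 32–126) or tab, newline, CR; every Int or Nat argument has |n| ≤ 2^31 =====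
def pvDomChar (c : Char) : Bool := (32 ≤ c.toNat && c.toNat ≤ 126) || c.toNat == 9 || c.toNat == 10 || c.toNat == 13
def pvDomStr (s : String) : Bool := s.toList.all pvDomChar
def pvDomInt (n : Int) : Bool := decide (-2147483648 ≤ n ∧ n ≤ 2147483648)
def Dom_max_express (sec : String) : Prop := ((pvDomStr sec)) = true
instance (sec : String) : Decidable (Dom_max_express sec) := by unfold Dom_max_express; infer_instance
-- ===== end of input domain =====

-- B replaces A's linear dueling-pointer scan by a brute-force search over all rotations
-- (simpler, not faster); equal return value proved for every input.

-- ===== PORT A =====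
-- the while loop of A: state (k, i, j), returns the final (i, j)
def loopA (cs : List Char) (n k i j : Nat) : Nat × Nat :=
  if h : k < n ∧ i < n ∧ j < n then
    if cs.getD ((i + k) % n) ' ' = cs.getD ((j + k) % n) ' ' then
      loopA cs n (k + 1) i j
    else
      if cs.getD ((i + k) % n) ' ' < cs.getD ((j + k) % n) ' ' then
        -- i = i + k + 1; if i == j: i += 1
        if i + k + 1 = j then loopA cs n 0 (i + k + 2) j
        else loopA cs n 0 (i + k + 1) j
      else
        -- j = j + k + 1; if i == j: i += 1
        if i = j + k + 1 then loopA cs n 0 (i + 1) (j + k + 1)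
        else loopA cs n 0 i (j + k + 1)
  else (i, j)
termination_by 3 * n - (k + i + j)
decreasing_by all_goals omega

def max_express (sec : String) : Int × String :=
  let cs := sec.toList
  let n := cs.length
  let p := loopA cs n 0 0 1
  let i := if p.1 < p.2 then p.1 else p.2
  ((i : Int), String.ofList (cs.drop i ++ cs.take i))

-- ===== PORT B =====
-- Python '<' on (ASCII) strings: lexicographic comparison of the char lists
def ltCh : List Char → List Char → Bool
  | _, [] => false
  | [], _ :: _ => true
  | a :: as, b :: bs => if a < b then true else if b < a then false else ltCh as bs

-- sec[t:] + sec[:t]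
def rotL (cs : List Char) (t : Nat) : List Char := cs.drop t ++ cs.take t

def max_express_alt (sec : String) : Int × String :=
  let cs := sec.toList
  let n := cs.length
  let best := (List.range' 1 (n - 1)).foldl
    (fun b x => if ltCh (rotL cs b) (rotL cs x) then x else b) 0
  ((best : Int), String.ofList (cs.drop best ++ cs.take best))

-- ===== PRECONDITION & SPEC =====
def Spec_max_express (sec : String) (out : Int × String) : Prop := out = max_express_alt sec
instance (sec : String) (out : Int × String) : Decidable (Spec_max_express sec out) := by unfold Spec_max_express; infer_instance

-- ===== CLAIM (what is proved, stated in full; the proofs are below) =====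
def Claim_equal_max_express : Prop := ∀ (sec : String), Dom_max_express sec → Spec_max_express sec (max_express sec)

-- ===== LEMMAS AND PROOFS =====

-- t is the least index (below cs.length) whose rotation is lexicographically largest
def IsBest (cs : List Char) (t : Nat) : Prop :=
  t < cs.length ∧ (∀ u < cs.length, ltCh (rotL cs t) (rotL cs u) = false) ∧
    (∀ u < t, ltCh (rotL cs u) (rotL cs t) = true)

theorem ltCh_irrefl (a : List Char) : ltCh a a = false := by
  induction a with
  | nil => rfl
  | cons x xs ih => simp [ltCh, ih]

theorem ltCh_trans : ∀ {a b c : List Char}, ltCh a b = true → ltCh b c = true → ltCh a c = true := by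
  intro a
  induction a with
  | nil =>
    intro b c hab hbc
    cases b with
    | nil => cases c with
      | nil => simp [ltCh] at hbc
      | cons y ys => simp [ltCh]
    | cons x xs => cases c with
      | nil => simp [ltCh] at hbc
      | cons y ys => simp [ltCh]
  | cons a as ih =>
    intro b c hab hbc
    cases b with
    | nil => simp [ltCh] at hab
    | cons x xs =>
      cases c with
      | nil => simp [ltCh] at hbc
      | cons y ys =>
        simp only [ltCh] at hab hbc ⊢
        rcases lt_trichotomy a x with h1 | h1 | h1
        · rcases lt_trichotomy x y with h2 | h2 | h2
          · simp [lt_trans h1 h2]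
          · subst h2; simp [h1]
          · simp [not_lt_of_gt h2, h2] at hbc
        · subst h1
          rcases lt_trichotomy a y with h2 | h2 | h2
          · simp [h2]
          · subst h2
            simp only [lt_irrefl, if_false] at hab hbc ⊢
            exact ih hab hbc
          · simp [not_lt_of_gt h2, h2] at hbc
        · simp [not_lt_of_gt h1, h1] at hab

theorem eq_of_not_ltCh : ∀ {a b : List Char}, ltCh a b = false → ltCh b a = false → a = b := by
  intro a
  induction a with
  | nil =>
    intro b hab hba
    cases b with
    | nil => rfl
    | cons y ys => simp [ltCh] at hab
  | cons a as ih =>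
    intro b hab hba
    cases b with
    | nil => simp [ltCh] at hba
    | cons y ys =>
      simp only [ltCh] at hab hba
      rcases lt_trichotomy a y with h | h | h
      · simp [h] at hab
      · subst h
        simp only [lt_irrefl, if_false] at hab hba
        exact congrArg₂ _ rfl (ih hab hba)
      · simp [h] at hba

theorem ltCh_of_firstdiff : ∀ (p : Nat) (a b : List Char), a.length = b.length → p < a.length →
    (∀ m < p, a.getD m ' ' = b.getD m ' ') → a.getD p ' ' < b.getD p ' ' → ltCh a b = true := by
  intro p
  induction p with
  | zero =>
    intro a b hlen hp hag hd
    cases a with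
    | nil => simp at hp
    | cons x xs =>
      cases b with
      | nil => simp at hlen
      | cons y ys =>
        simp only [List.getD_cons_zero] at hd
        simp [ltCh, hd]
  | succ p ih =>
    intro a b hlen hp hag hd
    cases a with
    | nil => simp at hp
    | cons x xs =>
      cases b with
      | nil => simp at hlen
      | cons y ys =>
        have hhead : x = y := by
          have := hag 0 (Nat.succ_pos p)
          simpa using this
        subst hhead
        have : ltCh xs ys = true := by
          apply ih xs ys
          · simpa using hlen
          · simpa using hp
          · intro m hm
            have := hag (m + 1) (by omega)
            simpa using this
          · simpa using hd
        simp [ltCh, this]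

theorem eq_of_agree_all : ∀ {a b : List Char}, a.length = b.length →
    (∀ m < a.length, a.getD m ' ' = b.getD m ' ') → a = b := by
  intro a
  induction a with
  | nil =>
    intro b hlen _
    cases b with
    | nil => rfl
    | cons y ys => simp at hlen
  | cons x xs ih =>
    intro b hlen hag
    cases b with
    | nil => simp at hlen
    | cons y ys =>
      have hhead : x = y := by simpa using hag 0 (by simp)
      have htail : xs = ys := by
        apply ih
        · simpa using hlen
        · intro m hm
          have := hag (m + 1) (by simp; omega)
          simpa using this
      rw [hhead, htail]

theorem length_rotL (cs : List Char) (t : Nat) (h : t ≤ cs.length) :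
    (rotL cs t).length = cs.length := by
  simp [rotL]; omega

theorem getD_rotL (cs : List Char) (t m : Nat) (ht : t < cs.length) (hm : m < cs.length) :
    (rotL cs t).getD m ' ' = cs.getD ((t + m) % cs.length) ' ' := by
  have hn : 0 < cs.length := by omega
  simp only [rotL, List.getD_eq_getElem?_getD]
  rw [List.getElem?_append]
  by_cases hc : m < cs.length - t
  · rw [if_pos (by simpa using hc), List.getElem?_drop]
    have : (t + m) % cs.length = t + m := Nat.mod_eq_of_lt (by omega)
    rw [this]
  · rw [if_neg (by simpa using hc)]
    have h2 : (t + m) % cs.length = t + m - cs.length := by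
      rw [Nat.mod_eq_sub_mod (by omega), Nat.mod_eq_of_lt (by omega)]
    have h3 : m - (cs.drop t).length = t + m - cs.length := by
      simp only [List.length_drop]; omega
    rw [h2, h3, List.getElem?_take, if_pos (by omega)]

theorem dominate (cs : List Char) (n k i j : Nat) (hn : n = cs.length) (hnpos : 0 < n)
    (hk : k < n)
    (hEQ : ∀ m < k, cs.getD ((i + m) % n) ' ' = cs.getD ((j + m) % n) ' ')
    (hlt : cs.getD ((i + k) % n) ' ' < cs.getD ((j + k) % n) ' ') :
    ∀ d ≤ k, ¬ IsBest cs ((i + d) % n) := by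
  subst hn
  intro d hd hbest
  obtain ⟨_, h1, _⟩ := hbest
  have hu : (j + d) % cs.length < cs.length := Nat.mod_lt _ hnpos
  have hfalse := h1 ((j + d) % cs.length) hu
  have htrue : ltCh (rotL cs ((i + d) % cs.length)) (rotL cs ((j + d) % cs.length)) = true := by
    apply ltCh_of_firstdiff (k - d)
    · rw [length_rotL _ _ (le_of_lt (Nat.mod_lt _ hnpos)),
        length_rotL _ _ (le_of_lt (Nat.mod_lt _ hnpos))]
    · rw [length_rotL _ _ (le_of_lt (Nat.mod_lt _ hnpos))]; omega
    · intro m hm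
      rw [getD_rotL _ _ _ (Nat.mod_lt _ hnpos) (by omega),
        getD_rotL _ _ _ (Nat.mod_lt _ hnpos) (by omega)]
      simp only [Nat.mod_add_mod]
      have e1 : i + d + m = i + (d + m) := by omega
      have e2 : j + d + m = j + (d + m) := by omega
      rw [e1, e2]
      exact hEQ (d + m) (by omega)
    · rw [getD_rotL _ _ _ (Nat.mod_lt _ hnpos) (by omega),
        getD_rotL _ _ _ (Nat.mod_lt _ hnpos) (by omega)]
      simp only [Nat.mod_add_mod]
      have e1 : i + d + (k - d) = i + k := by omega
      have e2 : j + d + (k - d) = j + k := by omega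
      rw [e1, e2]
      exact hlt
  rw [hfalse] at htrue
  cases htrue

theorem periodic_notbest (cs : List Char) (n m0 M : Nat) (hn : n = cs.length)
    (hm : m0 < M) (hM : M < n)
    (hEQ' : ∀ mm < n, cs.getD ((m0 + mm) % n) ' ' = cs.getD ((M + mm) % n) ' ') :
    ∀ t, M ≤ t → t < n → ¬ IsBest cs t := by
  have hnpos : 0 < n := by omega
  -- the string is invariant under a cyclic shift by d = M - m0
  have hper : ∀ q < n, cs.getD q ' ' = cs.getD ((q + (M - m0)) % n) ' ' := by
    intro q hq
    have hmm : (q + n - m0) % n < n := Nat.mod_lt _ hnpos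
    have := hEQ' ((q + n - m0) % n) hmm
    rw [Nat.add_mod_mod, Nat.add_mod_mod] at this
    rw [show m0 + (q + n - m0) = q + n from by omega] at this
    rw [show M + (q + n - m0) = (q + (M - m0)) + n from by omega] at this
    rw [Nat.add_mod_right, Nat.add_mod_right, Nat.mod_eq_of_lt hq] at this
    exact this
  intro t htM htn hbest
  obtain ⟨_, _, h2⟩ := hbest
  have hu := h2 (t - (M - m0)) (by omega)
  have hrot : rotL cs (t - (M - m0)) = rotL cs t := by
    apply eq_of_agree_all
    · rw [length_rotL _ _ (by omega), length_rotL _ _ (by omega)]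
    · intro mm hmm
      rw [length_rotL _ _ (by omega)] at hmm
      rw [getD_rotL _ _ _ (by omega) hmm, getD_rotL _ _ _ (by omega) hmm]
      have hq : (t - (M - m0) + mm) % cs.length < cs.length := Nat.mod_lt _ (by omega)
      have := hper ((t - (M - m0) + mm) % cs.length) (by omega)
      rw [hn] at this
      rw [this, Nat.mod_add_mod,
        show t - (M - m0) + mm + (M - m0) = t + mm from by omega]
  rw [hrot, ltCh_irrefl] at hu
  cases hu

theorem loopA_post (cs : List Char) (n : Nat) (hn : n = cs.length) :
    ∀ k i j, i ≠ j → k ≤ n →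
    (∀ m < k, cs.getD ((i + m) % n) ' ' = cs.getD ((j + m) % n) ' ') →
    (∀ t, t < n → t ≠ min i j → t < max i j → ¬ IsBest cs t) →
    ∀ t, t < n →
      t ≠ (if (loopA cs n k i j).1 < (loopA cs n k i j).2 then (loopA cs n k i j).1 else (loopA cs n k i j).2) →
      ¬ IsBest cs t := by
  intro k i j
  induction k, i, j using loopA.induct (cs := cs) (n := n) with
  | case1 k i j h heq ih =>
    intro hij hk hEQ hINV
    rw [loopA, dif_pos h, if_pos heq]
    apply ih hij (by omega) ?_ hINV
    intro m hm
    rcases Nat.lt_succ_iff_lt_or_eq.mp hm with hm' | hm'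
    · exact hEQ m hm'
    · subst hm'; exact heq
  | case2 k i h hne hlt ih =>
    intro hij hk hEQ hINV
    rw [loopA, dif_pos h, if_neg hne, if_pos hlt, if_pos rfl]
    apply ih (by omega) (by omega) (fun m hm => absurd hm (by omega))
    intro t ht ht1 ht2
    by_cases hdc : i ≤ t
    · have hdom := dominate cs n k i (i + k + 1) hn (by omega) (by omega) hEQ hlt
        (t - i) (by omega)
      rwa [show i + (t - i) = t from by omega, Nat.mod_eq_of_lt ht] at hdom
    · exact hINV t ht (by omega) (by omega)
  | case3 k i j h hne hlt hnj ih =>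
    intro hij hk hEQ hINV
    rw [loopA, dif_pos h, if_neg hne, if_pos hlt, if_neg hnj]
    apply ih hnj (by omega) (fun m hm => absurd hm (by omega))
    intro t ht ht1 ht2
    by_cases hdc : i ≤ t ∧ t ≤ i + k
    · have hdom := dominate cs n k i j hn (by omega) (by omega) hEQ hlt
        (t - i) (by omega)
      rwa [show i + (t - i) = t from by omega, Nat.mod_eq_of_lt ht] at hdom
    · exact hINV t ht (by omega) (by omega)
  | case4 k j h hne hnlt ih =>
    intro hij hk hEQ hINV
    rw [loopA, dif_pos h, if_neg hne, if_neg hnlt, if_pos rfl]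
    have hlt' : cs.getD ((j + k) % n) ' ' < cs.getD ((j + k + 1 + k) % n) ' ' := by
      rcases lt_trichotomy (cs.getD ((j + k + 1 + k) % n) ' ') (cs.getD ((j + k) % n) ' ') with hc | hc | hc
      · exact absurd hc hnlt
      · exact absurd hc hne
      · exact hc
    apply ih (by omega) (by omega) (fun m hm => absurd hm (by omega))
    intro t ht ht1 ht2
    by_cases hdc : j ≤ t
    · have hdom := dominate cs n k j (j + k + 1) hn (by omega) (by omega)
        (fun m hm => (hEQ m hm).symm) hlt' (t - j) (by omega)
      rwa [show j + (t - j) = t from by omega, Nat.mod_eq_of_lt ht] at hdom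
    · exact hINV t ht (by omega) (by omega)
  | case5 k i j h hne hnlt hni ih =>
    intro hij hk hEQ hINV
    rw [loopA, dif_pos h, if_neg hne, if_neg hnlt, if_neg hni]
    have hlt' : cs.getD ((j + k) % n) ' ' < cs.getD ((i + k) % n) ' ' := by
      rcases lt_trichotomy (cs.getD ((i + k) % n) ' ') (cs.getD ((j + k) % n) ' ') with hc | hc | hc
      · exact absurd hc hnlt
      · exact absurd hc hne
      · exact hc
    apply ih (by omega) (by omega) (fun m hm => absurd hm (by omega))
    intro t ht ht1 ht2
    by_cases hdc : j ≤ t ∧ t ≤ j + k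
    · have hdom := dominate cs n k j i hn (by omega) (by omega)
        (fun m hm => (hEQ m hm).symm) hlt' (t - j) (by omega)
      rwa [show j + (t - j) = t from by omega, Nat.mod_eq_of_lt ht] at hdom
    · exact hINV t ht (by omega) (by omega)
  | case6 k i j hexit =>
    intro hij hk hEQ hINV t ht htne
    rw [loopA, dif_neg hexit] at htne
    simp only at htne
    by_cases hin : i < n ∧ j < n
    · have hkn : k = n := by omega
      rw [hkn] at hEQ
      rcases lt_or_gt_of_ne hij with hij' | hij'
      · rw [if_pos hij'] at htne
        by_cases htM : t < j
        · exact hINV t ht (by omega) (by omega)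
        · exact periodic_notbest cs n i j hn hij' (by omega) hEQ t (by omega) ht
      · rw [if_neg (by omega)] at htne
        by_cases htM : t < i
        · exact hINV t ht (by omega) (by omega)
        · exact periodic_notbest cs n j i hn hij' (by omega)
            (fun mm hmm => (hEQ mm hmm).symm) t (by omega) ht
    · rcases lt_or_gt_of_ne hij with hij' | hij'
      · rw [if_pos hij'] at htne
        exact hINV t ht (by omega) (by omega)
      · rw [if_neg (by omega)] at htne
        exact hINV t ht (by omega) (by omega)

theorem foldB (cs : List Char) : ∀ (len s b : Nat), b < s →
    (∀ u < s, ltCh (rotL cs b) (rotL cs u) = false) →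
    (∀ u < b, ltCh (rotL cs u) (rotL cs b) = true) →
    ((List.range' s len).foldl (fun b x => if ltCh (rotL cs b) (rotL cs x) then x else b) b < s + len ∧
     (∀ u < s + len, ltCh (rotL cs ((List.range' s len).foldl (fun b x => if ltCh (rotL cs b) (rotL cs x) then x else b) b)) (rotL cs u) = false) ∧
     (∀ u < (List.range' s len).foldl (fun b x => if ltCh (rotL cs b) (rotL cs x) then x else b) b,
        ltCh (rotL cs u) (rotL cs ((List.range' s len).foldl (fun b x => if ltCh (rotL cs b) (rotL cs x) then x else b) b)) = true)) := by
  intro len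
  induction len with
  | zero =>
    intro s b hb h1 h2
    simp only [List.range'_zero, List.foldl_nil]
    exact ⟨by omega, fun u hu => h1 u (by omega), h2⟩
  | succ len ih =>
    intro s b hb h1 h2
    rw [List.range'_succ, List.foldl_cons]
    have hmain :
        (if ltCh (rotL cs b) (rotL cs s) then s else b) < s + 1 ∧
        (∀ u < s + 1, ltCh (rotL cs (if ltCh (rotL cs b) (rotL cs s) then s else b)) (rotL cs u) = false) ∧
        (∀ u < (if ltCh (rotL cs b) (rotL cs s) then s else b),
          ltCh (rotL cs u) (rotL cs (if ltCh (rotL cs b) (rotL cs s) then s else b)) = true) := by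
      by_cases hlt : ltCh (rotL cs b) (rotL cs s) = true
      · rw [if_pos hlt]
        refine ⟨by omega, ?_, ?_⟩
        · intro u hu
          rcases Nat.lt_succ_iff_lt_or_eq.mp hu with hus | hus
          · by_contra hcon
            have hcon' : ltCh (rotL cs s) (rotL cs u) = true := by
              cases hcv : ltCh (rotL cs s) (rotL cs u) with
              | false => exact absurd hcv hcon
              | true => rfl
            have := ltCh_trans hlt hcon'
            rw [h1 u hus] at this; cases this
          · subst hus; exact ltCh_irrefl _
        · intro u hu
          rcases Nat.lt_or_ge u b with hub | hub
          · exact ltCh_trans (h2 u hub) hlt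
          · rcases Nat.eq_or_lt_of_le hub with hub' | hub'
            · subst hub'; exact hlt
            · by_cases hub2 : ltCh (rotL cs u) (rotL cs b) = true
              · exact ltCh_trans hub2 hlt
              · have heq := eq_of_not_ltCh (Bool.eq_false_iff.mpr hub2) (h1 u hu)
                rw [heq]; exact hlt
      · rw [if_neg hlt]
        refine ⟨by omega, ?_, h2⟩
        intro u hu
        rcases Nat.lt_succ_iff_lt_or_eq.mp hu with hus | hus
        · exact h1 u hus
        · subst hus; exact Bool.eq_false_iff.mpr hlt
    obtain ⟨hb', h1', h2'⟩ := hmain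
    have := ih (s + 1) _ hb' h1' h2'
    refine ⟨by omega, fun u hu => this.2.1 u (by omega), this.2.2⟩

-- ===== VERDICT (by name: the statement is the Claim_ definition above) =====
theorem max_express_spec : Claim_equal_max_express := by
  intro sec _
  unfold Spec_max_express max_express max_express_alt
  dsimp only
  by_cases hn0 : sec.toList.length = 0
  · have hnil : sec.toList = [] := List.length_eq_zero_iff.mp hn0
    rw [hnil]
    rw [loopA]
    norm_num
  · have hpos : 0 < sec.toList.length := Nat.pos_of_ne_zero hn0
    have hB := foldB sec.toList (sec.toList.length - 1) 1 0 (by omega)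
      (fun u hu => by
        have : u = 0 := by omega
        subst this; exact ltCh_irrefl _)
      (fun u hu => absurd hu (by omega))
    rw [show 1 + (sec.toList.length - 1) = sec.toList.length from by omega] at hB
    have hbest : IsBest sec.toList
        ((List.range' 1 (sec.toList.length - 1)).foldl
          (fun b x => if ltCh (rotL sec.toList b) (rotL sec.toList x) then x else b) 0) :=
      ⟨hB.1, hB.2.1, hB.2.2⟩
    have hA := loopA_post sec.toList sec.toList.length rfl 0 0 1 (by omega) (by omega)
      (fun m hm => absurd hm (by omega))
      (fun t ht h1 h2 => False.elim (by omega))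
    have hr :
        (if (loopA sec.toList sec.toList.length 0 0 1).1 < (loopA sec.toList sec.toList.length 0 0 1).2
          then (loopA sec.toList sec.toList.length 0 0 1).1
          else (loopA sec.toList sec.toList.length 0 0 1).2) =
        (List.range' 1 (sec.toList.length - 1)).foldl
          (fun b x => if ltCh (rotL sec.toList b) (rotL sec.toList x) then x else b) 0 := by
      by_contra hne
      exact hA _ hB.1 (Ne.symm hne) hbest
    rw [hr]
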